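-- pv_equiv track=rewrite | github.com/robertocarlosjuan/Text-Region-Grouping | subtitle_name.py | remove_duplicate_bbox
-- ===== SOURCE A (Python) =====
-- def check_coor_match(prev_coor, curr_coor, margin):
--     mismatch = False
--     for p, c in zip(prev_coor, curr_coor):
--         if abs(p-c) <= margin:
--             continue
--         else:
--             mismatch = True
--             break
--
--     return mismatch
--
-- def remove_duplicate_bbox(frame_to_subtitle, frame_to_name):
--     for (k_sub, v_sub), (k_name, v_name) in zip(frame_to_subtitle.items(), frame_to_name.items()):
--         new_v_name = []
--         if k_sub == k_name:
--             for bbox_name in v_name: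
--                 remove_coor = False
--                 for bbox_sub in v_sub:
--                     if not check_coor_match(bbox_sub, bbox_name, 5):
--                         remove_coor = True
--                         break
--                 if not remove_coor:
--                     new_v_name.append(bbox_name)
--         frame_to_name[k_name] = new_v_name
--
--     return frame_to_name
-- ===== SOURCE B (Python) =====
-- # B: per frame, spatially hash the subtitle bboxes by first coordinate into
-- # width-11 buckets (margin 5 => a matching bbox lands in the same or an adjacent
-- # bucket); each name bbox is deep-checked only against 3 buckets.
-- # Mutates frame_to_name in place (return value == mutated argument).
--
-- def _near(s, b):
--     return all(abs(p - c) <= 5 for p, c in zip(s, b))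
--
-- def remove_duplicate_bbox(frame_to_subtitle, frame_to_name):
--     for (k_sub, v_sub), (k_name, v_name) in zip(frame_to_subtitle.items(),
--                                                 frame_to_name.items()):
--         if k_sub != k_name:
--             frame_to_name[k_name] = []
--             continue
--         buckets = {}
--         for s in v_sub:
--             buckets.setdefault(s[0] // 11, []).append(s)
--         kept = []
--         for b in v_name:
--             h = b[0] // 11
--             if not any(_near(s, b)
--                        for k in (h - 1, h, h + 1)
--                        for s in buckets.get(k, ())):
--                 kept.append(b)
--         frame_to_name[k_name] = kept
--     return frame_to_name
-- ===== Notes on version B (the rewrite author's own statement) =====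
-- stated objective: alternative
-- what changed: Per frame, B spatially hashes the subtitle bboxes by their first coordinate into width-11 buckets (margin 5), so each name bbox is deep-compared only against the subtitle bboxes of its 3 neighbouring buckets instead of scanning the whole subtitle list; Pre_ excludes inputs containing an empty bbox, on which B's bucketing indexes b[0] and raises IndexError while A returns a value.
-- outside the precondition, e.g. on remove_duplicate_bbox({'f': [[]]}, {'f': [[1, 2]]}): A returns {'f': []}, B raises IndexError; on remove_duplicate_bbox({'f': [[0, 0]]}, {'f': [[]]}): A returns {'f': []}, B raises IndexError
import Mathlib
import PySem

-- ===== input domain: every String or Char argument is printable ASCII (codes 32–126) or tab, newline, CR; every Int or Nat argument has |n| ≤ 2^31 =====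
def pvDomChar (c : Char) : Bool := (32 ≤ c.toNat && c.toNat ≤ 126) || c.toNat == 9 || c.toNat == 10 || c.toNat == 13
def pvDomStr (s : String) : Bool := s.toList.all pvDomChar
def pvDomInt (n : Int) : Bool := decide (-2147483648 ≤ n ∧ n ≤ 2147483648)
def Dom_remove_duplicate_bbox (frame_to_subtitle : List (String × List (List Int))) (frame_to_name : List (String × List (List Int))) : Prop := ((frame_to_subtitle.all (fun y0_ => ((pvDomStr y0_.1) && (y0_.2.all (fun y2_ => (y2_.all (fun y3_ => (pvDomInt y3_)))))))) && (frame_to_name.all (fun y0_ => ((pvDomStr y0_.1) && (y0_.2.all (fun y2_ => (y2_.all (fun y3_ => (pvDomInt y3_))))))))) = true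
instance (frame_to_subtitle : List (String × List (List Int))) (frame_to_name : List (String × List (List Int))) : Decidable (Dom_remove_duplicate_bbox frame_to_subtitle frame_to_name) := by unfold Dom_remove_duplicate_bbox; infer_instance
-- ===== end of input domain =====

-- B replaces A's scan of every subtitle bbox per name bbox by a spatial hash of
-- subtitle bboxes on their first coordinate (width-11 buckets, margin 5), so each
-- name bbox deep-checks only 3 buckets; both Pythons mutate frame_to_name in
-- place, the equivalence proved is about the returned value.

-- ===== PORT A =====
-- the inner loop of check_coor_match (flag `mismatch` with break)
def cmLoop (margin : Int) : List (Int × Int) → Bool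
  | [] => false
  | (p, c) :: rest => if |p - c| ≤ margin then cmLoop margin rest else true

def check_coor_match (prev_coor curr_coor : List Int) (margin : Int) : Bool :=
  cmLoop margin (prev_coor.zip curr_coor)

-- `for bbox_sub in v_sub: if not check_coor_match(...): remove_coor = True; break`
def aScan (bbox_name : List Int) : List (List Int) → Bool
  | [] => false
  | s :: ss => if !(check_coor_match s bbox_name 5) then true else aScan bbox_name ss

-- `for bbox_name in v_name: ... if not remove_coor: new_v_name.append(bbox_name)`
def aFilter (v_sub : List (List Int)) : List (List Int) → List (List Int)
  | [] => []
  | b :: bs => if aScan b v_sub then aFilter v_sub bs else b :: aFilter v_sub bs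

-- the outer `for ... in zip(...)` loop; mutation frame_to_name[k_name] = new_v_name = Dict.insert
def aGo (acc : PySem.Dict String (List (List Int))) :
    List ((String × List (List Int)) × (String × List (List Int))) →
      PySem.Dict String (List (List Int))
  | [] => acc
  | ((k_sub, v_sub), (k_name, v_name)) :: rest =>
      aGo (acc.insert k_name (if k_sub == k_name then aFilter v_sub v_name else [])) rest

def remove_duplicate_bbox (frame_to_subtitle : List (String × List (List Int))) (frame_to_name : List (String × List (List Int))) : List (String × List (List Int)) :=
  (aGo (PySem.Dict.mk frame_to_name) (frame_to_subtitle.zip frame_to_name)).items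

-- ===== PORT B =====
-- _near(s, b) = all(abs(p - c) <= 5 for p, c in zip(s, b))
def bNearLoop : List (Int × Int) → Bool
  | [] => true
  | (p, c) :: rest => if |p - c| ≤ 5 then bNearLoop rest else false

def bNear (s b : List Int) : Bool := bNearLoop (s.zip b)

-- s[0] // 11 (s is nonempty on every input admitted by Pre_; headD is exact there)
def bHash (s : List Int) : Int := PySem.Int.floordiv (s.headD 0) 11

-- `buckets = {}; for s in v_sub: buckets.setdefault(s[0] // 11, []).append(s)`
def bBuckets (v_sub : List (List Int)) : PySem.Dict Int (List (List Int)) :=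
  (v_sub.map (fun s => (bHash s, s))).foldl
    (fun d p => d.modify p.1 [] (· ++ [p.2])) PySem.Dict.empty

-- the `for b in v_name` loop building `kept`
def bKeep (bk : PySem.Dict Int (List (List Int))) : List (List Int) → List (List Int)
  | [] => []
  | b :: bs =>
      let h := bHash b
      if (bk.getD (h - 1) [] ++ bk.getD h [] ++ bk.getD (h + 1) []).any
          (fun s => bNear s b) then
        bKeep bk bs
      else b :: bKeep bk bs

def bFrame (v_sub v_name : List (List Int)) : List (List Int) :=
  bKeep (bBuckets v_sub) v_name

def bGo (acc : PySem.Dict String (List (List Int))) :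
    List ((String × List (List Int)) × (String × List (List Int))) →
      PySem.Dict String (List (List Int))
  | [] => acc
  | ((k_sub, v_sub), (k_name, v_name)) :: rest =>
      bGo (acc.insert k_name (if k_sub == k_name then bFrame v_sub v_name else [])) rest

def remove_duplicate_bbox_alt (frame_to_subtitle : List (String × List (List Int))) (frame_to_name : List (String × List (List Int))) : List (String × List (List Int)) :=
  (bGo (PySem.Dict.mk frame_to_name) (frame_to_subtitle.zip frame_to_name)).items

-- ===== PRECONDITION & SPEC =====
-- Pre_ excludes inputs where a zipped frame with matching keys contains an empty
-- bbox: there B's bucketing indexes bbox[0] and raises IndexError, while A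
-- returns a value (A treats such a bbox as matching everything through an empty zip).
def Pre_remove_duplicate_bbox (frame_to_subtitle : List (String × List (List Int))) (frame_to_name : List (String × List (List Int))) : Prop :=
  ((frame_to_subtitle.zip frame_to_name).all (fun pr =>
    !(pr.1.1 == pr.2.1) ||
      (pr.1.2.all (fun b => !b.isEmpty) && pr.2.2.all (fun b => !b.isEmpty)))) = true
instance (frame_to_subtitle : List (String × List (List Int))) (frame_to_name : List (String × List (List Int))) : Decidable (Pre_remove_duplicate_bbox frame_to_subtitle frame_to_name) := by unfold Pre_remove_duplicate_bbox; infer_instance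

def pvWitness_remove_duplicate_bbox : (List (String × List (List Int))) × (List (String × List (List Int))) :=
  ([("f", [[10, 20], [100, 100]])], [("f", [[12, 18], [60, 60]])])

def Spec_remove_duplicate_bbox (frame_to_subtitle : List (String × List (List Int))) (frame_to_name : List (String × List (List Int))) (out : List (String × List (List Int))) : Prop := out = remove_duplicate_bbox_alt frame_to_subtitle frame_to_name
instance (frame_to_subtitle : List (String × List (List Int))) (frame_to_name : List (String × List (List Int))) (out : List (String × List (List Int))) : Decidable (Spec_remove_duplicate_bbox frame_to_subtitle frame_to_name out) := by unfold Spec_remove_duplicate_bbox; infer_instance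

-- ===== CLAIM (what is proved, stated in full; the proofs are below) =====
def Claim_equal_remove_duplicate_bbox : Prop := ∀ (frame_to_subtitle : List (String × List (List Int))) (frame_to_name : List (String × List (List Int))), Dom_remove_duplicate_bbox frame_to_subtitle frame_to_name → Pre_remove_duplicate_bbox frame_to_subtitle frame_to_name → Spec_remove_duplicate_bbox frame_to_subtitle frame_to_name (remove_duplicate_bbox frame_to_subtitle frame_to_name)

-- ===== LEMMAS AND PROOFS =====

-- B's "near" is the negation of A's "mismatch"
theorem bNearLoop_eq_not_cmLoop (l : List (Int × Int)) : bNearLoop l = !cmLoop 5 l := by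
  induction l with
  | nil => rfl
  | cons pc rest ih =>
      obtain ⟨p, c⟩ := pc
      simp only [bNearLoop, cmLoop]
      split_ifs <;> simp [ih]

theorem bNear_eq (s b : List Int) : bNear s b = !check_coor_match s b 5 := by
  simp [bNear, check_coor_match, bNearLoop_eq_not_cmLoop]

-- A's remove_coor loop is an existence test
theorem aScan_eq_any (b : List Int) (vs : List (List Int)) :
    aScan b vs = vs.any (fun s => bNear s b) := by
  induction vs with
  | nil => rfl
  | cons s ss ih =>
      simp only [aScan, List.any_cons, bNear_eq, ih]
      cases check_coor_match s b 5 <;> simp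

-- bucket contents characterised
theorem mem_bBuckets (v_sub : List (List Int)) (c : Int) (s : List Int) :
    s ∈ (bBuckets v_sub).getD c [] ↔ s ∈ v_sub ∧ bHash s = c := by
  simp only [bBuckets, PySem.Dict.getD_foldl_modify_append, PySem.Dict.getD_empty,
    List.nil_append]
  simp [List.mem_map]

-- nearby first coordinates hash to adjacent buckets
theorem hash_adjacent (x y : Int) (h : |x - y| ≤ 5) :
    PySem.Int.floordiv x 11 = PySem.Int.floordiv y 11 - 1 ∨
    PySem.Int.floordiv x 11 = PySem.Int.floordiv y 11 ∨
    PySem.Int.floordiv x 11 = PySem.Int.floordiv y 11 + 1 := by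
  have hx := PySem.Int.floordiv_mul_add_mod x 11
  have hy := PySem.Int.floordiv_mul_add_mod y 11
  have hx1 := PySem.Int.mod_nonneg x (b := 11) (by norm_num)
  have hx2 := PySem.Int.mod_lt x (b := 11) (by norm_num)
  have hy1 := PySem.Int.mod_nonneg y (b := 11) (by norm_num)
  have hy2 := PySem.Int.mod_lt y (b := 11) (by norm_num)
  rw [abs_le] at h
  omega

-- a near pair shares the zipped first coordinate bound
theorem bNear_head (p q : Int) (ss bs : List Int) (h : bNear (p :: ss) (q :: bs) = true) :
    |p - q| ≤ 5 := by
  simp only [bNear, List.zip_cons_cons, bNearLoop] at h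
  by_contra hc
  simp [hc] at h

-- the existence test over all of v_sub equals the test over the three buckets
theorem any_eq_bucket_any (v_sub : List (List Int)) (b0 : Int) (bt : List Int)
    (hne : ∀ s ∈ v_sub, s ≠ []) :
    (v_sub.any (fun s => bNear s (b0 :: bt))) =
      (((bBuckets v_sub).getD (bHash (b0 :: bt) - 1) [] ++
        (bBuckets v_sub).getD (bHash (b0 :: bt)) [] ++
        (bBuckets v_sub).getD (bHash (b0 :: bt) + 1) []).any
          (fun s => bNear s (b0 :: bt))) := by
  apply Bool.eq_iff_iff.mpr
  simp only [List.any_eq_true, List.mem_append]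
  constructor
  · rintro ⟨s, hs, hnear⟩
    refine ⟨s, ?_, hnear⟩
    cases s with
    | nil => exact absurd rfl (hne [] hs)
    | cons p ps =>
        have hpq := bNear_head p b0 ps bt hnear
        have hadj := hash_adjacent p b0 hpq
        have hmem : ∀ c, bHash (p :: ps) = c →
            (p :: ps) ∈ (bBuckets v_sub).getD c [] := by
          intro c hc
          exact (mem_bBuckets v_sub c (p :: ps)).mpr ⟨hs, hc⟩
        have hh : bHash (p :: ps) = PySem.Int.floordiv p 11 := by simp [bHash]
        have hb : bHash (b0 :: bt) = PySem.Int.floordiv b0 11 := by simp [bHash]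
        rcases hadj with h1 | h1 | h1
        · exact Or.inl (Or.inl (hmem _ (by rw [hh, h1, hb])))
        · exact Or.inl (Or.inr (hmem _ (by rw [hh, h1, hb])))
        · exact Or.inr (hmem _ (by rw [hh, h1, hb]))
  · rintro ⟨s, hs, hnear⟩
    refine ⟨s, ?_, hnear⟩
    rcases hs with (h | h) | h <;>
      exact ((mem_bBuckets v_sub _ s).mp h).1

-- per-frame equality (all bboxes nonempty)
theorem aFilter_eq_bFrame (v_sub v_name : List (List Int))
    (hs : ∀ s ∈ v_sub, s ≠ []) (hn : ∀ b ∈ v_name, b ≠ []) :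
    aFilter v_sub v_name = bFrame v_sub v_name := by
  unfold bFrame
  induction v_name with
  | nil => rfl
  | cons b bs ih =>
      have hb := hn b (by simp)
      have ih' := ih (fun x hx => hn x (by simp [hx]))
      cases b with
      | nil => exact absurd rfl hb
      | cons b0 bt =>
          simp only [aFilter, bKeep, aScan_eq_any]
          rw [any_eq_bucket_any v_sub b0 bt hs, ih']

-- the two outer loops coincide, given nonempty bboxes on every zipped frame
theorem aGo_eq_bGo (zl : List ((String × List (List Int)) × (String × List (List Int))))
    (acc : PySem.Dict String (List (List Int)))
    (h : ∀ pr ∈ zl, pr.1.1 = pr.2.1 → (∀ s ∈ pr.1.2, s ≠ []) ∧ (∀ b ∈ pr.2.2, b ≠ [])) :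
    aGo acc zl = bGo acc zl := by
  induction zl generalizing acc with
  | nil => rfl
  | cons hd rest ih =>
      obtain ⟨⟨ks, vs⟩, ⟨kn, vn⟩⟩ := hd
      simp only [aGo, bGo]
      by_cases hk : ks = kn
      · have hhd := h ((ks, vs), (kn, vn)) (by simp) hk
        rw [aFilter_eq_bFrame vs vn hhd.1 hhd.2]
        exact ih _ (fun pr hpr => h pr (by simp [hpr]))
      · have : (ks == kn) = false := by simp [hk]
        rw [this]
        exact ih _ (fun pr hpr => h pr (by simp [hpr]))

-- ===== VERDICT (by name: the statement is the Claim_ definition above) =====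
theorem remove_duplicate_bbox_spec : Claim_equal_remove_duplicate_bbox := by
  intro fts ftn _ hpre
  unfold Spec_remove_duplicate_bbox remove_duplicate_bbox remove_duplicate_bbox_alt
  rw [aGo_eq_bGo]
  intro pr hpr hk
  simp only [Pre_remove_duplicate_bbox, List.all_eq_true] at hpre
  have hthis := hpre pr hpr
  rw [hk] at hthis
  simp only [beq_self_eq_true, Bool.not_true, Bool.false_or, Bool.and_eq_true,
    List.all_eq_true] at hthis
  constructor
  · intro s hsm
    simpa using hthis.1 s hsm
  · intro b hbm
    simpa using hthis.2 b hbm
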